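-- pv_equiv track=rewrite | github.com/szymeq17/Uni | Introduction to Python/Lista 8/zad3.py | ukladalne
-- ===== SOURCE A (Python) =====
-- def slownik(s):
--     d = {}
--     for l in s:
--         if l in d:
--             d[l] += 1
--         else:
--             d[l] = 1
--     return d
--
-- def ukladalne(s, u):
--     ds = slownik(s)
--     du = slownik(u)
--     for e in ds:
--         if e not in du:
--             return False
--         if ds[e]>du[e]:
--             return False
--     return True
-- ===== SOURCE B (Python) =====
-- def ukladalne(s, u):
--     du = {}
--     for c in u:
--         du[c] = du.get(c, 0) + 1
--     for c in s:
--         r = du.get(c, 0)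
--         if r == 0:
--             return False
--         du[c] = r - 1
--     return True
-- ===== Notes on version B (the rewrite author's own statement) =====
-- stated objective: alternative
-- what changed: Instead of building two frequency dicts and comparing them key by key afterwards, B builds only u's frequency dict and makes one consuming pass over s, decrementing a live remaining-budget counter and failing as soon as a character's budget is exhausted or missing.
import Mathlib
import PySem

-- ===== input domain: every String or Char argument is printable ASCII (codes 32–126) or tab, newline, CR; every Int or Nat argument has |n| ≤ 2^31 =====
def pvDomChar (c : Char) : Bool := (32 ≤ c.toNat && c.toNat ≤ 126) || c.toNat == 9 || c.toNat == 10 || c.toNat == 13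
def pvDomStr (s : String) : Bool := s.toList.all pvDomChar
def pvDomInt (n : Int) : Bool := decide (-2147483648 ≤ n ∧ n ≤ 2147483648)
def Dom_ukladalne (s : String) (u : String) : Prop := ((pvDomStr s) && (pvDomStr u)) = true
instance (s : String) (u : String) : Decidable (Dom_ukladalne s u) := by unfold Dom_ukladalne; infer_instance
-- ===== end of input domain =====

-- B replaces A's "build two frequency dicts, then compare" with one consuming pass over s
-- against a live remaining-budget dict built from u (alternative decomposition; same cost).

-- ===== PORT A =====
-- slownik: 'd[l] += 1' is Dict.modify on an existing key; 'd[l] = 1' on a fresh key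
def slownikA (cs : List Char) : PySem.Dict Char Int :=
  cs.foldl (fun d l => if d.contains l then d.modify l 0 (· + 1) else d.insert l 1)
    PySem.Dict.empty

-- the 'for e in ds: …return False…' loop; ds[e]/du[e] are read as getD, exact here since
-- e ranges over ds's keys and du.contains e has just been checked
def ukladalneLoopA (ds du : PySem.Dict Char Int) : List Char → Bool
  | [] => true
  | e :: rest =>
    if !du.contains e then false
    else if ds.getD e 0 > du.getD e 0 then false
    else ukladalneLoopA ds du rest

def ukladalne (s : String) (u : String) : Bool :=
  let ds := slownikA s.toList
  let du := slownikA u.toList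
  ukladalneLoopA ds du ds.keys

-- ===== PORT B =====
-- du[c] = du.get(c, 0) + 1
def budgetB (cs : List Char) : PySem.Dict Char Int :=
  cs.foldl (fun d c => d.insert c (d.getD c 0 + 1)) PySem.Dict.empty

-- the consuming pass: r = du.get(c, 0); if r == 0: return False; du[c] = r - 1
def consumeB (du : PySem.Dict Char Int) : List Char → Bool
  | [] => true
  | c :: rest =>
    let r := du.getD c 0
    if r == 0 then false
    else consumeB (du.insert c (r - 1)) rest

def ukladalne_alt (s : String) (u : String) : Bool :=
  consumeB (budgetB u.toList) s.toList

-- ===== PRECONDITION & SPEC =====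
def Spec_ukladalne (s : String) (u : String) (out : Bool) : Prop := out = ukladalne_alt s u
instance (s : String) (u : String) (out : Bool) : Decidable (Spec_ukladalne s u out) := by unfold Spec_ukladalne; infer_instance

-- ===== CLAIM (what is proved, stated in full; the proofs are below) =====
def Claim_equal_ukladalne : Prop := ∀ (s : String) (u : String), Dom_ukladalne s u → Spec_ukladalne s u (ukladalne s u)

-- ===== LEMMAS AND PROOFS =====

lemma slownikA_eq_counter (cs : List Char) : slownikA cs = PySem.Dict.counter cs := by
  rw [PySem.Dict.counter_eq_foldl]
  unfold slownikA
  congr 1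
  funext d l
  by_cases h : d.contains l = true
  · simp [h]
  · simp only [Bool.not_eq_true] at h
    simp [h, PySem.Dict.insert, PySem.Dict.modify, PySem.Dict.getD_of_not_contains d 0 h]

lemma ukladalneLoopA_true_iff (ds du : PySem.Dict Char Int) (es : List Char) :
    ukladalneLoopA ds du es = true ↔
      ∀ e ∈ es, du.contains e = true ∧ ds.getD e 0 ≤ du.getD e 0 := by
  induction es with
  | nil => simp [ukladalneLoopA]
  | cons e rest ih =>
    unfold ukladalneLoopA
    by_cases h1 : du.contains e = true
    · by_cases h2 : ds.getD e 0 > du.getD e 0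
      · rw [if_neg (by simp [h1]), if_pos h2]
        simp only [Bool.false_eq_true, false_iff]
        intro h
        exact absurd (h e List.mem_cons_self).2 (by omega)
      · rw [if_neg (by simp [h1]), if_neg h2, ih]
        constructor
        · intro h c hc
          rcases List.mem_cons.mp hc with rfl | hr
          · exact ⟨h1, by omega⟩
          · exact h c hr
        · intro h c hc
          exact h c (List.mem_cons_of_mem _ hc)
    · rw [if_pos (by simp [h1])]
      simp only [Bool.false_eq_true, false_iff]
      intro h
      exact absurd (h e List.mem_cons_self).1 h1

lemma consumeB_true_iff (xs : List Char) : ∀ (du : PySem.Dict Char Int),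
    (∀ c, 0 ≤ du.getD c 0) →
    (consumeB du xs = true ↔ ∀ c ∈ xs, (xs.count c : Int) ≤ du.getD c 0) := by
  induction xs with
  | nil => intro du _; simp [consumeB]
  | cons c rest ih =>
    intro du hnn
    by_cases hz : du.getD c 0 = 0
    · rw [show consumeB du (c :: rest) = false from by simp [consumeB, hz]]
      simp only [Bool.false_eq_true, false_iff]
      intro h
      have h1 := h c List.mem_cons_self
      have hmem : c ∈ c :: rest := List.mem_cons_self
      have h2 : (0 : Int) < ((c :: rest).count c : Int) := by
        exact_mod_cast List.count_pos_iff.mpr hmem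
      omega
    · have hnn' : ∀ c', 0 ≤ (du.insert c (du.getD c 0 - 1)).getD c' 0 := by
        intro c'
        by_cases hc : c' = c
        · rw [hc, PySem.Dict.getD_insert_self]
          have := hnn c; omega
        · rw [PySem.Dict.getD_insert_of_ne du _ _ hc]; exact hnn c'
      rw [show consumeB du (c :: rest) = consumeB (du.insert c (du.getD c 0 - 1)) rest from
        by simp [consumeB, hz]]
      rw [ih _ hnn']
      constructor
      · intro h c' hc'
        rcases List.mem_cons.mp hc' with rfl | hr
        · by_cases hcr : c' ∈ rest
          · have hle := h c' hcr
            rw [PySem.Dict.getD_insert_self] at hle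
            have hc1 : (c' :: rest).count c' = rest.count c' + 1 := by
              simp
            rw [hc1]; push_cast; omega
          · have hc0 : rest.count c' = 0 := List.count_eq_zero.mpr hcr
            have hc1 : (c' :: rest).count c' = 1 := by
              simp [hc0]
            rw [hc1]
            have := hnn c'; omega
        · by_cases hcc : c' = c
          · subst hcc
            have hle := h c' hr
            rw [PySem.Dict.getD_insert_self] at hle
            have hc1 : (c' :: rest).count c' = rest.count c' + 1 := by
              simp
            rw [hc1]; push_cast; omega
          · have hle := h c' hr
            rw [PySem.Dict.getD_insert_of_ne du _ _ hcc] at hle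
            have hc1 : (c :: rest).count c' = rest.count c' := by
              simp [Ne.symm hcc]
            rw [hc1]; exact hle
      · intro h c' hc'
        by_cases hcc : c' = c
        · subst hcc
          have hle := h c' (List.mem_cons_of_mem _ hc')
          have hc1 : (c' :: rest).count c' = rest.count c' + 1 := by
            simp
          rw [hc1] at hle
          rw [PySem.Dict.getD_insert_self]
          push_cast at hle
          omega
        · have hle := h c' (List.mem_cons_of_mem _ hc')
          have hc1 : (c :: rest).count c' = rest.count c' := by
            simp [Ne.symm hcc]
          rw [hc1] at hle
          rw [PySem.Dict.getD_insert_of_ne du _ _ hcc]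
          exact hle

lemma budgetB_eq_counter (cs : List Char) : budgetB cs = PySem.Dict.counter cs :=
  PySem.Dict.foldl_insert_getD_add_one_eq_counter cs

lemma ukladalne_true_iff (s u : String) :
    ukladalne s u = true ↔
      ∀ c ∈ s.toList, (s.toList.count c : Int) ≤ (u.toList.count c : Int) := by
  unfold ukladalne
  simp only [slownikA_eq_counter]
  rw [ukladalneLoopA_true_iff]
  constructor
  · intro h c hc
    have hk : c ∈ (PySem.Dict.counter s.toList).keys := by
      rw [PySem.Dict.keys_counter, PySem.Set.mem_ofList]; exact hc
    have := (h c hk).2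
    rwa [PySem.Dict.getD_counter, PySem.Dict.getD_counter] at this
  · intro h e he
    rw [PySem.Dict.keys_counter, PySem.Set.mem_ofList] at he
    have hle := h e he
    refine ⟨?_, by rwa [PySem.Dict.getD_counter, PySem.Dict.getD_counter]⟩
    rw [PySem.Dict.contains_counter]
    have hs : 0 < s.toList.count e := List.count_pos_iff.mpr he
    have hu : 0 < u.toList.count e := by
      have : (0 : Int) < (u.toList.count e : Int) := by
        have : (0 : Int) < (s.toList.count e : Int) := by exact_mod_cast hs
        omega
      exact_mod_cast this
    exact List.contains_iff_mem.mpr (List.count_pos_iff.mp hu)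

lemma ukladalne_alt_true_iff (s u : String) :
    ukladalne_alt s u = true ↔
      ∀ c ∈ s.toList, (s.toList.count c : Int) ≤ (u.toList.count c : Int) := by
  unfold ukladalne_alt
  rw [budgetB_eq_counter]
  rw [consumeB_true_iff _ _ (fun c => by rw [PySem.Dict.getD_counter]; positivity)]
  constructor
  · intro h c hc
    have := h c hc
    rwa [PySem.Dict.getD_counter] at this
  · intro h c hc
    rw [PySem.Dict.getD_counter]
    exact h c hc

-- ===== VERDICT (by name: the statement is the Claim_ definition above) =====
theorem ukladalne_spec : Claim_equal_ukladalne := by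
  intro s u _
  unfold Spec_ukladalne
  rw [Bool.eq_iff_iff, ukladalne_true_iff, ukladalne_alt_true_iff]
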